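-- pv_equiv track=rewrite | github.com/Thearetically-speaking/All-you-can-seal | list_metadata.py | inject_m221_after_vt0
-- ===== SOURCE A (Python) =====
-- FLOW_RATE = 120
--
-- def inject_m221_after_vt0(lines: list[str]) -> tuple[int, bool]:
--     target = f"M221 S{int(FLOW_RATE)}"
--     vt0_index = None
--
--     for idx, line in enumerate(lines):
--         if line.lstrip().startswith(";VT0"):
--             vt0_index = idx
--             break
--
--     if vt0_index is None:
--         return 0, False
--
--     search_end = len(lines)
--     for idx in range(vt0_index + 1, len(lines)):
--         stripped = lines[idx].strip()
--         if stripped.startswith("G0") or stripped.startswith("G1"):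
--             search_end = idx
--             break
--
--     for idx in range(vt0_index + 1, search_end):
--         if lines[idx].strip().startswith("M221 S"):
--             if lines[idx].strip() == target:
--                 return 0, True
--             lines[idx] = target + "\n"
--             return 1, True
--
--     lines.insert(vt0_index + 1, target + "\n")
--     return 1, True
-- ===== SOURCE B (Python) =====
-- from functools import reduce
--
-- FLOW_RATE = 120
--
--
-- def inject_m221_after_vt0(lines: list[str]) -> tuple[int, bool]:
--     target = f"M221 S{int(FLOW_RATE)}"
--
--     # One linear fold over enumerate(lines) with an explicit state machine;
--     # no breaks, no index ranges.  States:
--     #   ("seek", None)              still looking for the ;VT0 marker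
--     #   ("scan", vt0)               marker seen at vt0, examining following lines
--     #   ("done", (action, where))   decision made; absorbing
--     def step(state, pair):
--         mode, data = state
--         idx, line = pair
--         if mode == "seek":
--             if line.lstrip().startswith(";VT0"):
--                 return ("scan", idx)
--             return state
--         if mode == "scan":
--             s = line.strip()
--             if s.startswith("G0") or s.startswith("G1"):
--                 return ("done", ("insert", data))
--             if s.startswith("M221 S"):
--                 if s == target:
--                     return ("done", ("match", None))
--                 return ("done", ("replace", idx))
--             return state
--         return state
--
--     mode, data = reduce(step, enumerate(lines), ("seek", None))
--     if mode == "seek":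
--         return 0, False
--     if mode == "scan":
--         action, where = "insert", data
--     else:
--         action, where = data
--     if action == "match":
--         return 0, True
--     if action == "replace":
--         lines[where] = target + "\n"
--         return 1, True
--     lines.insert(where + 1, target + "\n")
--     return 1, True
-- ===== Notes on version B (the rewrite author's own statement) =====
-- stated objective: alternative
-- what changed: Replaces A's three break-driven index loops (find marker, find G0/G1 boundary, scan bounded range for M221) with a single functools.reduce fold over enumerate(lines) driving an explicit absorbing state machine (seek/scan/done), with the mutation decided afterwards from the final state.
import Mathlib
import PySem

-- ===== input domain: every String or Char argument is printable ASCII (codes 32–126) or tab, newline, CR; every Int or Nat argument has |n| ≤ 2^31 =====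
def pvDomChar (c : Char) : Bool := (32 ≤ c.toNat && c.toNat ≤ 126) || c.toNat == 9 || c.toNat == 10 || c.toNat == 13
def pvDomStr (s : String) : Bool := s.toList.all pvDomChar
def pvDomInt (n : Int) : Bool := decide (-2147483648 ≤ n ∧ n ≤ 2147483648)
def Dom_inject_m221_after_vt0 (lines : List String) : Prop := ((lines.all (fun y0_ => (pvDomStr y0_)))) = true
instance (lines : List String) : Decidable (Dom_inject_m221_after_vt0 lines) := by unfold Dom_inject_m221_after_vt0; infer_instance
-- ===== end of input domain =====

-- B replaces A's three break-driven index loops with one linear fold over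
-- enumerate(lines) driving an explicit absorbing state machine (seek / scan / done),
-- deciding the action afterwards; return values are identical.  Both Pythons mutate
-- `lines` identically in place; the equivalence proved here is about the returned
-- (int, bool) pair.


-- ===== PORT A =====
-- first loop: enumerate with break, returning the index of the first ";VT0" line
def aFindVT0 : List String → Nat → Option Nat
  | [], _ => none
  | l :: rest, idx =>
    if PySem.Str.startswith (PySem.Str.lstrip l) ";VT0" then some idx
    else aFindVT0 rest (idx + 1)

-- second loop: range(vt0+1, len(lines)) scanning for a G0/G1 line; `rest` is the
-- suffix lines[idx:], `dflt` is len(lines) (search_end's initial value)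
def aSearchEnd : List String → Nat → Nat → Nat
  | [], _, dflt => dflt
  | l :: rest, idx, dflt =>
    let stripped := PySem.Str.strip l
    if PySem.Str.startswith stripped "G0" || PySem.Str.startswith stripped "G1" then idx
    else aSearchEnd rest (idx + 1) dflt

-- third loop: range(vt0+1, search_end) looking for an "M221 S" line
def aFindM221 : List String → Nat → Nat → String → Int × Bool
  | [], _, _, _ => (1, true)
  | l :: rest, idx, searchEnd, target =>
    if searchEnd ≤ idx then (1, true)
    else if PySem.Str.startswith (PySem.Str.strip l) "M221 S" then
      (if PySem.Str.strip l == target then ((0 : Int), true) else ((1 : Int), true))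
    else aFindM221 rest (idx + 1) searchEnd target

def inject_m221_after_vt0 (lines : List String) : Int × Bool :=
  let target := "M221 S" ++ PySem.Int.toStr 120
  match aFindVT0 lines 0 with
  | none => (0, false)
  | some vt0 =>
    let searchEnd := aSearchEnd (lines.drop (vt0 + 1)) (vt0 + 1) lines.length
    aFindM221 (lines.drop (vt0 + 1)) (vt0 + 1) searchEnd target

-- ===== PORT B =====
-- the state machine threaded by Source B's reduce: seek / scan vt0 / done (action, where)
inductive BState
  | seek
  | scan (vt0 : Int)
  | doneInsert (vt0 : Int)
  | doneMatch
  | doneReplace (idx : Int)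
deriving DecidableEq, Repr

def bStep (target : String) (state : BState) (pair : Int × String) : BState :=
  match state with
  | .seek =>
    if PySem.Str.startswith (PySem.Str.lstrip pair.2) ";VT0" then .scan pair.1
    else state
  | .scan vt0 =>
    let s := PySem.Str.strip pair.2
    if PySem.Str.startswith s "G0" || PySem.Str.startswith s "G1" then .doneInsert vt0
    else if PySem.Str.startswith s "M221 S" then
      (if s == target then .doneMatch else .doneReplace pair.1)
    else state
  | _ => state

def inject_m221_after_vt0_alt (lines : List String) : Int × Bool :=
  let target := "M221 S" ++ PySem.Int.toStr 120
  match (PySem.List.enumerate lines).foldl (bStep target) .seek with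
  | .seek => (0, false)
  | .scan _ => (1, true)        -- action "insert"
  | .doneInsert _ => (1, true)  -- action "insert"
  | .doneMatch => (0, true)     -- action "match"
  | .doneReplace _ => (1, true) -- action "replace"

-- ===== PRECONDITION & SPEC =====
def Spec_inject_m221_after_vt0 (lines : List String) (out : Int × Bool) : Prop := out = inject_m221_after_vt0_alt lines
instance (lines : List String) (out : Int × Bool) : Decidable (Spec_inject_m221_after_vt0 lines out) := by unfold Spec_inject_m221_after_vt0; infer_instance

-- ===== CLAIM (what is proved, stated in full; the proofs are below) =====
def Claim_equal_inject_m221_after_vt0 : Prop := ∀ (lines : List String), Dom_inject_m221_after_vt0 lines → Spec_inject_m221_after_vt0 lines (inject_m221_after_vt0 lines)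

-- ===== LEMMAS AND PROOFS =====

-- the final answer read off a state (indices stored in states do not affect it)
def bAns : BState → Int × Bool
  | .seek => (0, false)
  | .scan _ => (1, true)
  | .doneInsert _ => (1, true)
  | .doneMatch => (0, true)
  | .doneReplace _ => (1, true)

-- proof-side direct recursion describing the scan phase's outcome
def bScan : List String → String → Int × Bool
  | [], _ => (1, true)
  | l :: rest, target =>
    let stripped := PySem.Str.strip l
    if PySem.Str.startswith stripped "G0" || PySem.Str.startswith stripped "G1" then (1, true)
    else if PySem.Str.startswith stripped "M221 S" then
      (if stripped == target then ((0 : Int), true) else ((1 : Int), true))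
    else bScan rest target

theorem alt_eq_bAns (lines : List String) :
    inject_m221_after_vt0_alt lines =
      bAns ((PySem.List.enumerate lines).foldl (bStep ("M221 S" ++ PySem.Int.toStr 120)) .seek) := by
  cases h : (PySem.List.enumerate lines).foldl (bStep ("M221 S" ++ PySem.Int.toStr 120)) .seek <;>
    simp [inject_m221_after_vt0_alt, h, bAns]

theorem foldl_done_insert (t : String) (l : List (Int × String)) (v : Int) :
    l.foldl (bStep t) (.doneInsert v) = .doneInsert v := by
  induction l with | nil => rfl | cons x xs ih => simpa [bStep] using ih

theorem foldl_done_match (t : String) (l : List (Int × String)) :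
    l.foldl (bStep t) .doneMatch = .doneMatch := by
  induction l with | nil => rfl | cons x xs ih => simpa [bStep] using ih

theorem foldl_done_replace (t : String) (l : List (Int × String)) (v : Int) :
    l.foldl (bStep t) (.doneReplace v) = .doneReplace v := by
  induction l with | nil => rfl | cons x xs ih => simpa [bStep] using ih

theorem fold_scan (t : String) (l : List String) (i v : Int) :
    bAns ((PySem.List.enumerate l i).foldl (bStep t) (.scan v)) = bScan l t := by
  induction l generalizing i with
  | nil => rfl
  | cons x xs ih =>
    rw [PySem.List.enumerate_cons, List.foldl_cons]
    simp only [bStep, bScan]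
    split_ifs with hg hm he
    · rw [foldl_done_insert]; rfl
    · rw [foldl_done_match]; rfl
    · rw [foldl_done_replace]; rfl
    · exact ih (i + 1)

theorem aFindVT0_shift (l : List String) (i j : Nat) :
    aFindVT0 l (i + j) = (aFindVT0 l i).map (· + j) := by
  induction l generalizing i with
  | nil => rfl
  | cons x xs ih =>
    simp only [aFindVT0]
    split
    · rfl
    · simpa [show i + j + 1 = i + 1 + j by omega] using ih (i + 1)

theorem fold_seek (t : String) (l : List String) (i : Int) :
    bAns ((PySem.List.enumerate l i).foldl (bStep t) .seek) =
      (match aFindVT0 l 0 with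
       | none => ((0 : Int), false)
       | some v => bScan (l.drop (v + 1)) t) := by
  induction l generalizing i with
  | nil => rfl
  | cons x xs ih =>
    rw [PySem.List.enumerate_cons]
    simp only [List.foldl_cons, bStep, aFindVT0]
    by_cases hv : PySem.Str.startswith (PySem.Str.lstrip x) ";VT0" = true
    · simp only [hv, if_true]
      rw [fold_scan]
      rfl
    · simp only [hv, Bool.false_eq_true, if_false]
      rw [ih (i + 1)]
      rw [show (0 : Nat) + 1 = 0 + 1 from rfl, aFindVT0_shift xs 0 1]
      cases h : aFindVT0 xs 0 with
      | none => simp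
      | some v => simp [List.drop]

theorem aSearchEnd_ge (l : List String) (i d : Nat) :
    aSearchEnd l i d = d ∨ i ≤ aSearchEnd l i d := by
  induction l generalizing i with
  | nil => left; rfl
  | cons x xs ih =>
    simp only [aSearchEnd]
    split
    · right; exact le_refl i
    · rcases ih (i + 1) with h | h
      · left; exact h
      · right; omega

theorem scan_eq (l : List String) (i : Nat) (t : String) :
    aFindM221 l i (aSearchEnd l i (i + l.length)) t = bScan l t := by
  induction l generalizing i with
  | nil => rfl
  | cons x xs ih =>
    simp only [aFindM221, aSearchEnd, bScan, List.length_cons]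
    by_cases hg : (PySem.Str.startswith (PySem.Str.strip x) "G0" || PySem.Str.startswith (PySem.Str.strip x) "G1") = true
    · simp only [hg, if_true, if_pos (le_refl i)]
    · have hge : i + 1 ≤ aSearchEnd xs (i + 1) (i + (xs.length + 1)) := by
        rcases aSearchEnd_ge xs (i + 1) (i + (xs.length + 1)) with h | h <;> omega
      simp only [hg, Bool.false_eq_true, if_false]
      rw [if_neg (show ¬ aSearchEnd xs (i + 1) (i + (xs.length + 1)) ≤ i by omega)]
      by_cases hm : PySem.Str.startswith (PySem.Str.strip x) "M221 S" = true
      · simp only [hm, if_true]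
      · simp only [hm, Bool.false_eq_true, if_false]
        have h2 : i + (xs.length + 1) = (i + 1) + xs.length := by omega
        rw [h2]
        exact ih (i + 1)

theorem aFindVT0_lt (l : List String) (i v : Nat) (h : aFindVT0 l i = some v) :
    i ≤ v ∧ v < i + l.length := by
  induction l generalizing i with
  | nil => simp [aFindVT0] at h
  | cons x xs ih =>
    simp only [aFindVT0] at h
    split at h
    · cases h; simp
    · have := ih (i + 1) h
      constructor <;> [omega; (simp only [List.length_cons]; omega)]

-- ===== VERDICT (by name: the statement is the Claim_ definition above) =====
theorem inject_m221_after_vt0_spec : Claim_equal_inject_m221_after_vt0 := by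
  intro lines _
  unfold Spec_inject_m221_after_vt0 inject_m221_after_vt0
  rw [alt_eq_bAns, fold_seek]
  cases h : aFindVT0 lines 0 with
  | none => rfl
  | some v =>
    simp only []
    have hv := aFindVT0_lt lines 0 v h
    have hlen : lines.length = (v + 1) + (lines.drop (v + 1)).length := by
      simp [List.length_drop]; omega
    rw [hlen]
    exact scan_eq _ (v + 1) _
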